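-- pv_equiv track=rewrite | github.com/Wulfic/Cicada3301 | Tools/attack_pages_21_30.py | string_to_key
-- ===== SOURCE A (Python) =====
-- RUNEGLISH = ['F', 'U', 'TH', 'O', 'R', 'C', 'G', 'W', 'H', 'N', 'I', 'J', 'EO', 'P',
--              'X', 'S', 'T', 'B', 'E', 'M', 'L', 'NG', 'OE', 'D', 'A', 'AE', 'Y', 'IA', 'EA']
--
-- def string_to_key(s):
--     """Convert string to key indices using Gematria"""
--     gematria_map = {runeglish: i for i, runeglish in enumerate(RUNEGLISH)}
--     key = []
--     i = 0
--     s = s.upper()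
--     while i < len(s):
--         if i + 1 < len(s) and s[i:i+2] in gematria_map:
--             key.append(gematria_map[s[i:i+2]])
--             i += 2
--         elif s[i] in gematria_map:
--             key.append(gematria_map[s[i]])
--             i += 1
--         else:
--             i += 1
--     return key
-- ===== SOURCE B (Python) =====
-- import re
--
-- RUNEGLISH = ['F', 'U', 'TH', 'O', 'R', 'C', 'G', 'W', 'H', 'N', 'I', 'J', 'EO', 'P',
--              'X', 'S', 'T', 'B', 'E', 'M', 'L', 'NG', 'OE', 'D', 'A', 'AE', 'Y', 'IA', 'EA']
--
-- # Two-char runes first: regex alternation is first-match, which reproduces the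
-- # two-char-preferred scan; non-rune characters are simply not matched (skipped).
-- _RUNE_RE = re.compile('TH|EO|NG|OE|AE|IA|EA|[FUORCGWHNIJPXSTBEMLDAY]')
-- _IDX = {r: i for i, r in enumerate(RUNEGLISH)}
--
-- def string_to_key(s):
--     """Convert string to key indices using Gematria"""
--     return [_IDX[t] for t in _RUNE_RE.findall(s.upper())]
-- ===== Notes on version B (the rewrite author's own statement) =====
-- stated objective: idiomatic
-- what changed: Replaces the hand-written index-advancing while loop with slice lookups by a single compiled regex (two-char runes ordered before the one-char class) that tokenizes the uppercased string in one findall, followed by a dict-lookup comprehension.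
import Mathlib
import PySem

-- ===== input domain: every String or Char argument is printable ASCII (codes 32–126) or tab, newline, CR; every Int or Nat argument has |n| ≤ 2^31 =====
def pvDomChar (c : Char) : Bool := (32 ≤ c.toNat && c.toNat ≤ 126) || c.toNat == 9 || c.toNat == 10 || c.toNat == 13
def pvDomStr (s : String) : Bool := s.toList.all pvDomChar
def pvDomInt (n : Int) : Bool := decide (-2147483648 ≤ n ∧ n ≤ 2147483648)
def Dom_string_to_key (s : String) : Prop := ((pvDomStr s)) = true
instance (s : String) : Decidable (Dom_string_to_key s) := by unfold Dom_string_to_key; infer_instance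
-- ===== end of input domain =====

-- B replaces A's index-advancing while loop with a first-match alternation tokenizer
-- (re.findall, two-char runes first) followed by a dict-lookup map: idiomatic, constant-factor faster (regex engine scan).


-- ===== PORT A =====
-- RUNEGLISH, as a list of key strings (strings handled as List Char throughout)
def pvRUNEGLISH : List (List Char) :=
  [['F'], ['U'], ['T','H'], ['O'], ['R'], ['C'], ['G'], ['W'], ['H'], ['N'], ['I'], ['J'],
   ['E','O'], ['P'], ['X'], ['S'], ['T'], ['B'], ['E'], ['M'], ['L'], ['N','G'], ['O','E'],
   ['D'], ['A'], ['A','E'], ['Y'], ['I','A'], ['E','A']]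

-- gematria_map = {runeglish: i for i, runeglish in enumerate(RUNEGLISH)}
def pvGm : PySem.Dict (List Char) Int :=
  (PySem.List.enumerate pvRUNEGLISH).foldl (fun d p => d.insert p.2 p.1) PySem.Dict.empty

-- the while loop: s[i:i+2] is the next two chars; i += 2 drops both, i += 1 drops one
def pvALoop (cs : List Char) : List Int :=
  match cs with
  | [] => []
  | c1 :: rest =>
    match rest with
    | c2 :: rest2 =>
      match pvGm.get? [c1, c2] with
      | some v => v :: pvALoop rest2
      | none =>
        match pvGm.get? [c1] with
        | some v => v :: pvALoop (c2 :: rest2)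
        | none => pvALoop (c2 :: rest2)
    | [] =>
      match pvGm.get? [c1] with
      | some v => [v]
      | none => []
termination_by cs.length
decreasing_by all_goals simp

def string_to_key (s : String) : List Int := pvALoop (PySem.Chars.upper s.toList)

-- ===== PORT B =====
-- the regex alternation 'TH|EO|NG|OE|AE|IA|EA|[FUORCGWHNIJPXSTBEMLDAY]'
def pvPairs : List (Char × Char) :=
  [('T','H'), ('E','O'), ('N','G'), ('O','E'), ('A','E'), ('I','A'), ('E','A')]
def pvClass : List Char :=
  ['F','U','O','R','C','G','W','H','N','I','J','P','X','S','T','B','E','M','L','D','A','Y']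

-- re.findall of that pattern: at each position try the alternatives in order
-- (two-char literals first, then the one-char class), else move on one character
def pvFindall (cs : List Char) : List (List Char) :=
  match cs with
  | [] => []
  | c1 :: rest =>
    match rest with
    | c2 :: rest2 =>
      if (c1, c2) ∈ pvPairs then [c1, c2] :: pvFindall rest2
      else if c1 ∈ pvClass then [c1] :: pvFindall (c2 :: rest2)
      else pvFindall (c2 :: rest2)
    | [] => if c1 ∈ pvClass then [[c1]] else []
termination_by cs.length
decreasing_by all_goals simp

-- _IDX = {r: i for i, r in enumerate(RUNEGLISH)}
def pvIdx : PySem.Dict (List Char) Int :=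
  (PySem.List.enumerate pvRUNEGLISH).foldl (fun d p => d.insert p.2 p.1) PySem.Dict.empty

def string_to_key_alt (s : String) : List Int :=
  (pvFindall (PySem.Chars.upper s.toList)).map (fun t => pvIdx.getD t 0)

-- ===== PRECONDITION & SPEC =====
def Spec_string_to_key (s : String) (out : List Int) : Prop := out = string_to_key_alt s
instance (s : String) (out : List Int) : Decidable (Spec_string_to_key s out) := by unfold Spec_string_to_key; infer_instance

-- ===== CLAIM (what is proved, stated in full; the proofs are below) =====
def Claim_equal_string_to_key : Prop := ∀ (s : String), Dom_string_to_key s → Spec_string_to_key s (string_to_key s)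

-- ===== LEMMAS AND PROOFS =====

-- pvGm, evaluated to its literal association list
theorem pvGm_eq : pvGm = PySem.Dict.mk
    [(['F'],0),(['U'],1),(['T','H'],2),(['O'],3),(['R'],4),(['C'],5),(['G'],6),(['W'],7),(['H'],8),(['N'],9),
     (['I'],10),(['J'],11),(['E','O'],12),(['P'],13),(['X'],14),(['S'],15),(['T'],16),(['B'],17),(['E'],18),
     (['M'],19),(['L'],20),(['N','G'],21),(['O','E'],22),(['D'],23),(['A'],24),(['A','E'],25),(['Y'],26),
     (['I','A'],27),(['E','A'],28)] := by decide

theorem pvIdx_eq_pvGm : pvIdx = pvGm := rfl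

-- a two-character key is in gematria_map exactly when it is one of the 7 digraph runes
set_option maxHeartbeats 1000000 in
theorem pvGm_pair (c1 c2 : Char) : pvGm.get? [c1, c2] =
    if (c1, c2) ∈ pvPairs then some (pvIdx.getD [c1, c2] 0) else none := by
  simp [pvIdx_eq_pvGm, pvGm_eq, PySem.Dict.get?_mk_cons, PySem.Dict.getD_eq_get?_getD, pvPairs]
  split_ifs <;> simp_all [eq_comm, PySem.Dict.get?]
  all_goals tauto

-- a one-character key is in gematria_map exactly when it is one of the 22 single runes
set_option maxHeartbeats 1000000 in
set_option maxRecDepth 8192 in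
theorem pvGm_single (c : Char) : pvGm.get? [c] =
    if c ∈ pvClass then some (pvIdx.getD [c] 0) else none := by
  by_cases hc : c ∈ pvClass
  · have hc' := hc
    simp only [pvClass, List.mem_cons, List.not_mem_nil, or_false] at hc'
    rcases hc' with rfl|rfl|rfl|rfl|rfl|rfl|rfl|rfl|rfl|rfl|rfl|rfl|rfl|rfl|rfl|rfl|rfl|rfl|rfl|rfl|rfl|rfl <;> decide
  · rw [if_neg hc, PySem.Dict.get?_eq_none_iff_not_mem_keys]
    simp_all [pvGm_eq, pvClass]

-- the loop emits exactly the index of each token B's tokenizer finds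
theorem pvLoop_eq (cs : List Char) : pvALoop cs = (pvFindall cs).map (fun t => pvIdx.getD t 0) := by
  induction hn : cs.length using Nat.strong_induction_on generalizing cs with
  | _ n ih =>
    match cs with
    | [] => simp [pvALoop, pvFindall]
    | [c1] =>
      rw [pvALoop, pvFindall, pvGm_single]
      split_ifs <;> simp
    | c1 :: c2 :: rest2 =>
      rw [pvALoop, pvFindall, pvGm_pair, pvGm_single]
      subst hn
      by_cases hp : (c1, c2) ∈ pvPairs
      · simp only [hp, if_true, List.map]
        rw [ih rest2.length (by simp) rest2 rfl]
      · by_cases hc : c1 ∈ pvClass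
        · simp only [hp, hc, if_true, if_false, List.map]
          rw [ih (c2 :: rest2).length (by simp) (c2 :: rest2) rfl]
        · simp only [hp, hc, if_false]
          rw [ih (c2 :: rest2).length (by simp) (c2 :: rest2) rfl]

-- ===== VERDICT (by name: the statement is the Claim_ definition above) =====
theorem string_to_key_spec : Claim_equal_string_to_key := by
  intro s _
  unfold Spec_string_to_key string_to_key string_to_key_alt
  exact pvLoop_eq _
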